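-- pv_equiv track=rewrite | github.com/hiitsAndre/mp2 | Part1.3.2/UCS_MinDistance.py | finish
-- ===== SOURCE A (Python) =====
-- def finish(node):
--     result = 0
--     for i in node[1:]:
--         if i == '':
--             result = 1
--         else:
--             result = 0
--             break
--     return result
-- ===== SOURCE B (Python) =====
-- def finish(node):
--     # tail is all-empty-and-nonempty  <=>  there are >= 2 elements and the
--     # concatenation of the tail has total length 0 (an arithmetic reduction,
--     # no per-element comparison loop and no early break)
--     return int(len(node) > 1 and len(''.join(node[1:])) == 0)
-- ===== Notes on version B (the rewrite author's own statement) =====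
-- stated objective: alternative
-- what changed: Replaces A's early-break accumulator loop with an arithmetic reduction: concatenate the tail and test that the joined length is 0 (plus len(node) > 1 for non-emptiness), so no element comparison or break occurs.
import Mathlib
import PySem

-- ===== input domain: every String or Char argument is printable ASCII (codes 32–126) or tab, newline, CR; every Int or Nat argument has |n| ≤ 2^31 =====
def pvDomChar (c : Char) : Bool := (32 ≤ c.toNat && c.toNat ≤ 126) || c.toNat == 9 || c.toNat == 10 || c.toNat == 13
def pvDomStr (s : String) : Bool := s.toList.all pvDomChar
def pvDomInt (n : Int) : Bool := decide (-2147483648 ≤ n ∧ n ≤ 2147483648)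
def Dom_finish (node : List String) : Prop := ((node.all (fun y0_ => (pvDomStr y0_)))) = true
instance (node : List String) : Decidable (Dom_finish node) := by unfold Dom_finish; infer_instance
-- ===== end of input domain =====

-- B replaces A's early-break comparison loop by an arithmetic reduction: join the tail and test total length 0 (alternative, not faster).
-- ===== PORT A =====
-- the for-loop of A: 'result' is the accumulator, 'break' returns 0 immediately
def finishLoop : List String → Int → Int
  | [], result => result
  | i :: rest, _ => if i == "" then finishLoop rest 1 else 0

def finish (node : List String) : Int :=
  finishLoop (PySem.List.slice node (some 1) none) 0

-- ===== PORT B =====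
def finish_alt (node : List String) : Int :=
  if PySem.List.len node > 1 ∧
      PySem.Str.len (PySem.Str.join "" (PySem.List.slice node (some 1) none)) = 0
    then 1 else 0

-- ===== PRECONDITION & SPEC =====
def Spec_finish (node : List String) (out : Int) : Prop := out = finish_alt node
instance (node : List String) (out : Int) : Decidable (Spec_finish node out) := by unfold Spec_finish; infer_instance

-- ===== CLAIM (what is proved, stated in full; the proofs are below) =====
def Claim_equal_finish : Prop := ∀ (node : List String), Dom_finish node → Spec_finish node (finish node)

-- ===== LEMMAS AND PROOFS =====
theorem loop_one (t : List String) :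
    finishLoop t 1 = if ∀ x ∈ t, x = "" then 1 else 0 := by
  induction t with
  | nil => simp [finishLoop]
  | cons i rest ih =>
    by_cases hi : i = "" <;> simp [finishLoop, hi, ih]

theorem loop_zero (t : List String) :
    finishLoop t 0 = if t ≠ [] ∧ ∀ x ∈ t, x = "" then 1 else 0 := by
  cases t with
  | nil => simp [finishLoop]
  | cons i rest =>
    by_cases hi : i = "" <;> simp [finishLoop, hi, loop_one]

theorem chars_join_nil_eq_nil (ps : List (List Char)) :
    PySem.Chars.join [] ps = [] ↔ ∀ p ∈ ps, p = [] := by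
  induction ps with
  | nil => simp [PySem.Chars.join_nil]
  | cons p rest ih =>
    cases rest with
    | nil => simp [PySem.Chars.join_singleton]
    | cons q r =>
      rw [PySem.Chars.join_cons_cons]
      simp_all

theorem join_len_zero (t : List String) :
    PySem.Str.len (PySem.Str.join "" t) = 0 ↔ ∀ x ∈ t, x = "" := by
  rw [PySem.Str.len_eq]
  rw [show ((((PySem.Str.join "" t).toList.length : Int)) = 0 ↔ (PySem.Str.join "" t).toList = []) from by
    simp [List.length_eq_zero_iff]]
  rw [PySem.Str.toList_join]
  have : ("" : String).toList = [] := rfl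
  rw [this, chars_join_nil_eq_nil]
  constructor
  · intro h x hx
    have := h x.toList (List.mem_map_of_mem hx)
    exact String.ext (by simpa [String.toList] using this)
  · intro h p hp
    rcases List.mem_map.mp hp with ⟨x, hx, rfl⟩
    simp [h x hx]

-- ===== VERDICT (by name: the statement is the Claim_ definition above) =====
theorem finish_spec : Claim_equal_finish := by
  intro node _
  unfold Spec_finish finish finish_alt
  rw [loop_zero]
  have hlen : (PySem.List.len node > 1) ↔ PySem.List.slice node (some 1) none ≠ [] := by
    rw [PySem.List.slice_from_one]
    cases node with
    | nil => simp [PySem.List.len]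
    | cons a tl => simp [PySem.List.len, List.ne_nil_iff_length_pos]
  by_cases h : PySem.List.slice node (some 1) none ≠ [] ∧
      ∀ x ∈ PySem.List.slice node (some 1) none, x = ""
  · rw [if_pos h, if_pos ⟨hlen.mpr h.1, (join_len_zero _).mpr h.2⟩]
  · rw [if_neg h, if_neg (fun hc => h ⟨hlen.mp hc.1, (join_len_zero _).mp hc.2⟩)]
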